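-- pv_equiv track=rewrite | github.com/iZhang/Python | CS101_Eclipse/apt_colorfultiles/src/ColorfulTiles.py | theMin
-- ===== SOURCE A (Python) =====
-- def theMin(room):
--     numChanges = 0
--     letter = room[0]
--     for i in range(1,len(room)):
--         if letter == room[i]:
--             letter = "X"
--             numChanges += 1
--         else:
--             letter = room[i]
--
--     return numChanges
-- ===== SOURCE B (Python) =====
-- def theMin(room):
--     total = 0
--     run = 0
--     prev = None
--     for ch in room:
--         if ch == prev:
--             run += 1
--         else:
--             total += run // 2
--             run = 1
--             prev = ch
--     return total + run // 2
-- ===== Notes on version B (the rewrite author's own statement) =====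
-- stated objective: simpler
-- what changed: B replaces A's sentinel-letter state machine ('X' written into the comparison variable after each forced change) by a single run-length scan that adds floor(run/2) for every maximal run of equal adjacent characters.
-- intended difference: On rooms containing three consecutive 'X' characters, or a maximal run of even length immediately followed by an 'X', A's sentinel value 'X' collides with the real tile colour 'X' and A overcounts (e.g. A('XXX')=2, A('aaX')=2), while B returns the true minimum number of changes (1 in both examples), which is the intended value since changed tiles may take any colour that avoids a new conflict. — e.g. on theMin("XXX"): A returns 2, B returns 1
import Mathlib
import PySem

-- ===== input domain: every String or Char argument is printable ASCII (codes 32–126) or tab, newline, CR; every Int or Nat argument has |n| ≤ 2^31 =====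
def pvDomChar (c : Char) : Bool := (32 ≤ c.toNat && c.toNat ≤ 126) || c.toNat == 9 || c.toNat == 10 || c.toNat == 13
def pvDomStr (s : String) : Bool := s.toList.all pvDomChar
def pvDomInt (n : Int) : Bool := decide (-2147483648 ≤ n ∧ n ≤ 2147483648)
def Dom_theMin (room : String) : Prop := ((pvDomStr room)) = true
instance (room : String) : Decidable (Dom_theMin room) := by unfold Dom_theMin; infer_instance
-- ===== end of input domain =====

set_option maxRecDepth 8000


-- B replaces A's 'X'-sentinel state machine by a run-length scan summing floor(run/2) per maximal run (simpler; return value only).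

-- ===== PORT A =====
-- 'for i in range(1, len(room)): … room[i] …' visits exactly the characters of room after the first,
-- so the loop is a fold over (room.toList.drop 1) with the same state (letter, numChanges).
def theMin (room : String) : Int :=
  match PySem.Str.pyGet? room 0 with
  | none => 0   -- Python raises IndexError at room[0]; excluded by Pre_theMin
  | some letter0 =>
    ((room.toList.drop 1).foldl
      (fun (st : Char × Int) c =>
        if st.1 = c then ('X', st.2 + 1) else (c, st.2))
      (letter0, 0)).2

-- ===== PORT B =====
def theMin_alt (room : String) : Int :=
  let s := room.toList.foldl
    (fun (st : Int × Int × Option Char) ch =>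
      if some ch = st.2.2 then (st.1, st.2.1 + 1, st.2.2)
      else (st.1 + PySem.Int.floordiv st.2.1 2, 1, some ch))
    (0, 0, none)
  s.1 + PySem.Int.floordiv s.2.1 2

-- ===== PRECONDITION & SPEC =====
-- Pre_ excludes only the empty room, on which Python A raises IndexError at room[0].
def Pre_theMin (room : String) : Prop := room ≠ ""
instance (room : String) : Decidable (Pre_theMin room) := by unfold Pre_theMin; infer_instance
def pvWitness_theMin : String := "abba"

-- On rooms containing three consecutive 'X's, or a maximal run of even length immediately followed
-- by an 'X', A's sentinel 'X' collides with the real colour 'X' and A overcounts (A "XXX" = 2,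
-- A "aaX" = 2); B returns the true minimum number of changes (1 in both examples), the intended value.
-- pvBadScan detects exactly that pattern: it tracks the current run's character and length parity.
def pvBadScan (c : Char) (evenRun : Bool) : List Char → Bool
  | [] => false
  | d :: ds =>
    if d = c then
      if c = 'X' ∧ evenRun then true else pvBadScan c (!evenRun) ds
    else
      if d = 'X' ∧ evenRun then true else pvBadScan d false ds

def D_theMin (room : String) : Prop :=
  match room.toList with
  | [] => False
  | c :: cs => pvBadScan c false cs = true
instance (room : String) : Decidable (D_theMin room) := by
  unfold D_theMin
  rcases room.toList with _ | ⟨c, cs⟩ <;> infer_instance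

def Spec_theMin (room : String) (out : Int) : Prop := ¬ D_theMin room → out = theMin_alt room
instance (room : String) (out : Int) : Decidable (Spec_theMin room out) := by
  unfold Spec_theMin; infer_instance

def pvDiffWitness_theMin : String := "XXX"
def pvDiffWitnessOut_theMin : Int × Int := (2, 1)

-- ===== CLAIM (what is proved, stated in full; the proofs are below) =====
def Claim_unchanged_theMin : Prop := ∀ (room : String), Dom_theMin room → Pre_theMin room → Spec_theMin room (theMin room)
def Claim_changed_theMin : Prop := Dom_theMin (pvDiffWitness_theMin) ∧ Pre_theMin (pvDiffWitness_theMin) ∧ D_theMin (pvDiffWitness_theMin) ∧ theMin (pvDiffWitness_theMin) = pvDiffWitnessOut_theMin.1 ∧ theMin_alt (pvDiffWitness_theMin) = pvDiffWitnessOut_theMin.2 ∧ pvDiffWitnessOut_theMin.1 ≠ pvDiffWitnessOut_theMin.2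
def Claim_exact_theMin : Prop := ∀ (room : String), Dom_theMin room → Pre_theMin room → D_theMin room → theMin room ≠ theMin_alt room


-- ===== LEMMAS AND PROOFS =====

-- Recursive views of the two folds.
def pvFaGo (letter : Char) (n : Int) : List Char → Int
  | [] => n
  | d :: ds => if letter = d then pvFaGo 'X' (n + 1) ds else pvFaGo d n ds

def pvFbGo (t : Int) (k : Nat) (c : Char) : List Char → Int
  | [] => t + (↑(k / 2) : Int)
  | d :: ds => if d = c then pvFbGo t (k + 1) c ds else pvFbGo (t + ↑(k / 2)) 1 d ds

-- The number of spurious sentinel collisions A will incur from this state on.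
def pvSpur (c : Char) (evenRun : Bool) : List Char → Nat
  | [] => 0
  | d :: ds =>
    if d = c then
      (if c = 'X' ∧ evenRun then 1 else 0) + pvSpur c (!evenRun) ds
    else
      if d = 'X' ∧ evenRun then 1 + pvSpur 'X' false ds
      else pvSpur d false ds

lemma pvBadScan_iff_spur (l : List Char) : ∀ (c : Char) (e : Bool),
    pvBadScan c e l = true ↔ pvSpur c e l ≠ 0 := by
  induction l with
  | nil => simp [pvBadScan, pvSpur]
  | cons d ds ih =>
    intro c e
    simp only [pvBadScan, pvSpur]
    split_ifs with hdc hx hx2 <;> simp [ih]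

lemma pvFaGo_add (l : List Char) : ∀ (letter : Char) (n m : Int),
    pvFaGo letter (n + m) l = pvFaGo letter n l + m := by
  induction l with
  | nil => intro letter n m; simp [pvFaGo]
  | cons d ds ih =>
    intro letter n m
    by_cases h : letter = d <;>
      simp [pvFaGo, h, add_right_comm, ih]

-- A's fold equals pvFaGo.
lemma pvFa_bridge (l : List Char) : ∀ (letter : Char) (n : Int),
    (l.foldl (fun (st : Char × Int) c =>
        if st.1 = c then ('X', st.2 + 1) else (c, st.2)) (letter, n)).2
      = pvFaGo letter n l := by
  induction l with
  | nil => intro letter n; simp [pvFaGo]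
  | cons d ds ih =>
    intro letter n
    by_cases h : letter = d <;> simp [pvFaGo, h, ih]

lemma pvFloordiv_natCast_two (k : Nat) :
    PySem.Int.floordiv (↑k) 2 = (↑(k / 2) : Int) := by
  exact_mod_cast PySem.Int.floordiv_natCast k 2

-- B's fold step, named for the proofs (definitionally the lambda in theMin_alt).
def pvStepB (st : Int × Int × Option Char) (ch : Char) : Int × Int × Option Char :=
  if some ch = st.2.2 then (st.1, st.2.1 + 1, st.2.2)
  else (st.1 + PySem.Int.floordiv st.2.1 2, 1, some ch)

lemma pvAltView (room : String) :
    theMin_alt room = (room.toList.foldl pvStepB (0, 0, none)).1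
      + PySem.Int.floordiv (room.toList.foldl pvStepB (0, 0, none)).2.1 2 := rfl

-- B's fold equals pvFbGo once the first character has been consumed.
lemma pvFb_bridge (l : List Char) : ∀ (t : Int) (k : Nat) (c : Char),
    (l.foldl pvStepB (t, (↑k : Int), some c)).1
      + PySem.Int.floordiv (l.foldl pvStepB (t, (↑k : Int), some c)).2.1 2 = pvFbGo t k c l := by
  induction l with
  | nil =>
    intro t k c
    show t + PySem.Int.floordiv (↑k) 2 = t + ((↑(k / 2)) : Int)
    rw [pvFloordiv_natCast_two k]
  | cons d ds ih =>
    intro t k c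
    by_cases h : d = c
    · subst h
      rw [List.foldl_cons]
      have hst : pvStepB (t, (↑k : Int), some d) d = (t, (↑k : Int) + 1, some d) := by
        simp [pvStepB]
      rw [hst, show ((↑k : Int) + 1) = ((↑(k + 1) : Int)) from by push_cast; ring, ih t (k + 1) d]
      simp [pvFbGo]
    · rw [List.foldl_cons]
      have hst : pvStepB (t, (↑k : Int), some c) d
          = (t + PySem.Int.floordiv (↑k) 2, 1, some d) := by
        simp [pvStepB, h]
      rw [hst, pvFloordiv_natCast_two k,
        show (1 : Int) = ((↑(1 : Nat) : Int)) from by norm_num, ih (t + ↑(k / 2)) 1 d]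
      simp [pvFbGo, h]

-- Main invariant: from a synchronised state (current run of k ≥ 1 copies of c; A's letter is c when
-- k is odd and the sentinel 'X' when k is even), A's count exceeds B's by the number of future
-- spurious sentinel collisions.
lemma pvMain (l : List Char) : ∀ (c : Char) (k : Nat) (t : Int), 1 ≤ k →
    pvFaGo (if k % 2 = 1 then c else 'X') (t + ↑(k / 2)) l
      = pvFbGo t k c l + ↑(pvSpur c (decide (k % 2 = 0)) l) := by
  induction l with
  | nil => intro c k t _; simp [pvFaGo, pvFbGo, pvSpur]
  | cons d ds ih =>
    intro c k t hk
    rcases Nat.even_or_odd k with hke | hko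
    · -- k even: A's letter is the sentinel 'X'
      have h2 : k % 2 = 0 := Nat.even_iff.mp hke
      have h1 : ¬ (k % 2 = 1) := by omega
      rw [if_neg h1]
      by_cases hdc : d = c
      · subst hdc
        by_cases hdx : d = 'X'
        · -- spurious collision: sentinel 'X' matches a third consecutive real 'X'
          subst hdx
          have hmain := ih 'X' (k + 1) t (by omega)
          rw [show (k + 1) % 2 = 1 from by omega, show (k + 1) / 2 = k / 2 from by omega] at hmain
          norm_num at hmain
          simp only [pvFaGo, pvFbGo, pvSpur]
          norm_num [h2]
          rw [pvFaGo_add, hmain]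
          ring
        · -- sentinel 'X' ≠ d: no match, run of d continues
          have hmain := ih d (k + 1) t (by omega)
          rw [show (k + 1) % 2 = 1 from by omega, show (k + 1) / 2 = k / 2 from by omega] at hmain
          norm_num at hmain
          have hlx : ¬ (('X' : Char) = d) := fun h => hdx h.symm
          simp only [pvFaGo, pvFbGo, pvSpur]
          norm_num [h2, hlx, hdx]
          exact hmain
      · by_cases hdx : d = 'X'
        · -- spurious collision: sentinel 'X' matches the 'X' starting the next run
          subst hdx
          have hmain := ih 'X' 1 (t + ↑(k / 2)) (by omega)
          norm_num at hmain
          simp only [pvFaGo, pvFbGo, pvSpur]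
          norm_num [h2, hdc]
          rw [pvFaGo_add, hmain]
          ring
        · -- sentinel 'X' ≠ d: no match, new run of d
          have hmain := ih d 1 (t + ↑(k / 2)) (by omega)
          norm_num at hmain
          have hlx : ¬ (('X' : Char) = d) := fun h => hdx h.symm
          simp only [pvFaGo, pvFbGo, pvSpur]
          norm_num [h2, hdc, hlx, hdx]
          exact hmain
    · -- k odd: A's letter is c itself
      have h2 : k % 2 = 1 := Nat.odd_iff.mp hko
      rw [if_pos h2]
      by_cases hdc : d = c
      · -- match: A counts, letter becomes the sentinel
        subst hdc
        have hmain := ih d (k + 1) t (by omega)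
        rw [show (k + 1) % 2 = 0 from by omega, show (k + 1) / 2 = k / 2 + 1 from by omega] at hmain
        norm_num at hmain
        simp only [pvFaGo, pvFbGo, pvSpur]
        norm_num [h2]
        rw [← add_assoc] at hmain
        exact hmain
      · -- run ends with A's letter = c ≠ d: no match
        have hmain := ih d 1 (t + ↑(k / 2)) (by omega)
        norm_num at hmain
        have hcd : ¬ (c = d) := fun h => hdc h.symm
        simp only [pvFaGo, pvFbGo, pvSpur]
        norm_num [h2, hdc, hcd]
        exact hmain

-- The two ports, on a nonempty room, reduced to pvFaGo / pvFbGo.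
lemma pvTheMin_eq (room : String) (c : Char) (cs : List Char) (h : room.toList = c :: cs) :
    theMin room = pvFaGo c 0 cs := by
  unfold theMin
  have hg : PySem.Str.pyGet? room 0 = some c := by
    simp [PySem.Str.pyGet?, PySem.List.pyGet?, PySem.List.pyIdx?, h]
  rw [hg]
  simp only [h, List.drop_succ_cons, List.drop_zero]
  exact pvFa_bridge cs c 0

lemma pvTheMinAlt_eq (room : String) (c : Char) (cs : List Char) (h : room.toList = c :: cs) :
    theMin_alt room = pvFbGo 0 1 c cs := by
  rw [pvAltView, h, List.foldl_cons]
  have hst : pvStepB (0, 0, none) c = (0 + PySem.Int.floordiv 0 2, 1, some c) := by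
    simp [pvStepB]
  rw [hst, show (0 : Int) + PySem.Int.floordiv 0 2 = 0 from by decide,
    show (1 : Int) = ((↑(1 : Nat) : Int)) from by norm_num]
  exact pvFb_bridge cs 0 1 c

lemma pvKey (room : String) (c : Char) (cs : List Char) (h : room.toList = c :: cs) :
    theMin room = theMin_alt room + ↑(pvSpur c false cs) := by
  rw [pvTheMin_eq room c cs h, pvTheMinAlt_eq room c cs h]
  have := pvMain cs c 1 0 (by omega)
  simp only [show (1 : Nat) % 2 = 1 by norm_num, show (1 : Nat) / 2 = 0 by norm_num] at this
  simpa using this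

lemma pvToList_ne (room : String) (hne : room ≠ "") : room.toList ≠ [] := by
  intro h
  exact hne (String.toList_eq_nil_iff.mp h)

-- ===== VERDICT (by name: the statement is the Claim_ definition above) =====
theorem theMin_spec : Claim_unchanged_theMin := by
  intro room _ hpre hnd
  obtain ⟨c, cs, h⟩ : ∃ c cs, room.toList = c :: cs := by
    rcases hl : room.toList with _ | ⟨c, cs⟩
    · exact absurd hl (pvToList_ne room hpre)
    · exact ⟨c, cs, rfl⟩
  have hd : pvSpur c false cs = 0 := by
    by_contra hs
    apply hnd
    unfold D_theMin
    rw [h]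
    exact (pvBadScan_iff_spur cs c false).mpr hs
  rw [pvKey room c cs h, hd]
  simp

theorem theMin_changed : Claim_changed_theMin := by
  unfold Claim_changed_theMin; decide

theorem theMin_tight : Claim_exact_theMin := by
  intro room _ hpre hd
  obtain ⟨c, cs, h⟩ : ∃ c cs, room.toList = c :: cs := by
    rcases hl : room.toList with _ | ⟨c, cs⟩
    · exact absurd hl (pvToList_ne room hpre)
    · exact ⟨c, cs, rfl⟩
  unfold D_theMin at hd
  rw [h] at hd
  have hs : pvSpur c false cs ≠ 0 := (pvBadScan_iff_spur cs c false).mp hd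
  rw [pvKey room c cs h]
  intro heq
  have : (↑(pvSpur c false cs) : Int) = 0 := by omega
  exact hs (by exact_mod_cast this)
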